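-- pv_equiv track=rewrite | github.com/Sakshikain7078/DSA | 4135-concatenate-non-zero-digits-and-multiply-by-sum-i/concatenate-non-zero-digits-and-multiply-by-sum-i.py | sumAndMultiply
-- ===== SOURCE A (Python) =====
-- def sumAndMultiply(n: int) -> int:
--     arr = []
--     for i in str(n):
--         if i != '0':
--             arr.append(i)
--     if not arr:
--         x = 0
--     else:
--
--         x = int(''.join(arr))
--     s = 0
--     for d in str(x):
--         s = s + int(d)
--     res = x*s
--     return res
-- ===== SOURCE B (Python) =====
-- def sumAndMultiply(n: int) -> int:
--     x = 0
--     s = 0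
--     for ch in str(n):
--         if ch != '0':
--             d = int(ch)
--             x = x * 10 + d
--             s += d
--     return x * s
-- ===== Notes on version B (the rewrite author's own statement) =====
-- stated objective: simpler
-- what changed: Single pass over str(n) that builds the concatenated value arithmetically (x = x*10 + d) and sums the digits at the same time, replacing A's list-append pass, ''.join + int re-parse, and a second pass that re-stringifies x to sum its digits.
import Mathlib
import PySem

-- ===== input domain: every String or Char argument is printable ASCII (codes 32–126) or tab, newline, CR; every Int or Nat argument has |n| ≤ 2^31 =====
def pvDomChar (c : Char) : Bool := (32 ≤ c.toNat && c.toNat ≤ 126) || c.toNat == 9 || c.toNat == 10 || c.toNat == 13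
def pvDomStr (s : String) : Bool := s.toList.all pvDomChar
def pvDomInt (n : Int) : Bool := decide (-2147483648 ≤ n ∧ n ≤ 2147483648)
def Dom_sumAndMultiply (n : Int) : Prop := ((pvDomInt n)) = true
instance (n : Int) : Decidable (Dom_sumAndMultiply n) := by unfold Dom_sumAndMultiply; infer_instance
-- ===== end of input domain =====

-- B fuses A's three passes (collect non-zero digit chars, int(''.join(..)), digit-sum of str(x))
-- into one pass that accumulates x arithmetically and sums the digits as it goes.

-- ===== PORT A =====
def sumAndMultiply (n : Int) : Int :=
  let arr : List Char :=
    (PySem.Int.toChars n).foldl (fun arr i => if i ≠ '0' then arr ++ [i] else arr) []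
  let x : Int := if arr = [] then 0 else (PySem.Int.ofStr? (String.ofList arr)).getD 0
  let s : Int :=
    (PySem.Int.toChars x).foldl (fun s d => s + (PySem.Int.ofStr? (String.ofList [d])).getD 0) 0
  x * s

-- ===== PORT B =====
def sumAndMultiply_alt (n : Int) : Int :=
  let q : Int × Int :=
    (PySem.Int.toChars n).foldl
      (fun (q : Int × Int) ch =>
        if ch ≠ '0' then
          let d : Int := (PySem.Int.ofStr? (String.ofList [ch])).getD 0
          (q.1 * 10 + d, q.2 + d)
        else q)
      (0, 0)
  q.1 * q.2

-- ===== PRECONDITION & SPEC =====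
-- Pre_ excludes negative n: there the Python A raises ValueError (int('-') in its digit-sum
-- loop), and the Python B raises the same way (int('-') on the sign character).
def Pre_sumAndMultiply (n : Int) : Prop := 0 ≤ n
instance (n : Int) : Decidable (Pre_sumAndMultiply n) := by unfold Pre_sumAndMultiply; infer_instance
def pvWitness_sumAndMultiply : Int := 102

def Spec_sumAndMultiply (n : Int) (out : Int) : Prop := out = sumAndMultiply_alt n
instance (n : Int) (out : Int) : Decidable (Spec_sumAndMultiply n out) := by unfold Spec_sumAndMultiply; infer_instance

-- ===== CLAIM (what is proved, stated in full; the proofs are below) =====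
def Claim_equal_sumAndMultiply : Prop := ∀ (n : Int), Dom_sumAndMultiply n → Pre_sumAndMultiply n → Spec_sumAndMultiply n (sumAndMultiply n)

-- ===== LEMMAS AND PROOFS =====

-- the Nat-level step "acc = acc*10 + digit value" both programs are built from
def pvStep (a : Nat) (c : Char) : Nat := a * 10 + (c.toNat - '0'.toNat)

-- big-endian decimal digit characters of a natural number (canonical: no leading zero)
def pvRep (n : Nat) : List Char :=
  if _h : n < 10 then [Nat.digitChar n]
  else pvRep (n / 10) ++ [Nat.digitChar (n % 10)]
decreasing_by exact Nat.div_lt_self (by omega) (by omega)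

lemma isDigit_toNat {c : Char} (h : c.isDigit = true) : 48 ≤ c.toNat ∧ c.toNat ≤ 57 := by
  revert h; simp only [Char.isDigit, Bool.and_eq_true, decide_eq_true_eq]
  intro ⟨h1, h2⟩
  exact ⟨UInt32.le_iff_toNat_le.mp h1, UInt32.le_iff_toNat_le.mp h2⟩

lemma isIntSpace_of_digit {c : Char} (h : c.isDigit = true) : PySem.Int.isIntSpace c = false := by
  obtain ⟨h1, h2⟩ := isDigit_toNat h
  unfold PySem.Int.isIntSpace
  simp only [Bool.or_eq_false_iff, decide_eq_false_iff_not]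
  refine ⟨⟨⟨⟨⟨?_,?_⟩,?_⟩,?_⟩,?_⟩,?_⟩ <;> rintro rfl <;> simp [Char.toNat] at h1 h2

lemma dropWhile_digits {p : Char → Bool} (l : List Char) (hd : ∀ c ∈ l, c.isDigit = true)
    (hp : ∀ c, c.isDigit = true → p c = false) : List.dropWhile p l = l := by
  rw [List.dropWhile_eq_self_iff]
  intro hl
  simp [hp _ (hd _ (List.getElem_mem hl))]

-- what Python's int() returns on a nonempty string of ASCII digits
theorem ofChars_digits : ∀ (t : List Char), t ≠ [] → (∀ c ∈ t, c.isDigit = true) →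
    PySem.Int.ofChars? t = some ((t.foldl pvStep 0 : Nat) : Int) := by
  intro t hne hd
  obtain ⟨c, t, rfl⟩ := List.exists_cons_of_ne_nil hne
  have hstrip : (List.dropWhile PySem.Int.isIntSpace (List.dropWhile PySem.Int.isIntSpace (c :: t)).reverse).reverse = c :: t := by
    rw [dropWhile_digits _ hd (fun _ h => isIntSpace_of_digit h)]
    rw [dropWhile_digits _ (fun x hx => hd x (List.mem_reverse.mp hx)) (fun _ h => isIntSpace_of_digit h)]
    exact List.reverse_reverse _
  unfold PySem.Int.ofChars?
  rw [hstrip]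
  conv_lhs => whnf
  split
  next ds heq =>
    obtain ⟨rfl, rfl⟩ := List.cons.injEq .. |>.mp heq |> (fun h => h)
    simp at hd
  next ds heq =>
    obtain ⟨rfl, rfl⟩ := List.cons.injEq .. |>.mp heq |> (fun h => h)
    simp at hd
  next ds h1 h2 =>
    clear h1 h2 hne hstrip
    have hc : c.isDigit = true := hd c (by simp)
    have hdt : ∀ x ∈ t, x.isDigit = true := fun x hx => hd x (by simp [hx])
    clear hd
    simp only [Option.map_id']
    have hcast : (some ((List.foldl pvStep 0 (c :: t) : Nat) : Int)) = Option.map (fun a : Nat => (a : Int)) (some (List.foldl pvStep 0 (c :: t))) := rfl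
    rw [hcast]
    refine Eq.trans (congrArg (fun o : Option Nat => o >>= fun a => pure ((a : Int))) (?_ : _ = some (List.foldl pvStep 0 (c :: t)))) (by rfl)
    conv_lhs => whnf
    rw [hc]
    conv_lhs => whnf
    simp only [Nat.zero_mul, Nat.zero_add, List.foldl_cons]
    rw [show pvStep 0 c = c.toNat - '0'.toNat by simp [pvStep]]
    generalize c.toNat - '0'.toNat = k
    clear hc hcast c ds
    induction t generalizing k with
    | nil => rfl
    | cons c' t' ih =>
      have hc' : c'.isDigit = true := hdt c' (by simp)
      conv_lhs => whnf
      rw [hc']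
      conv_lhs => whnf
      rw [List.foldl_cons, show pvStep k c' = k * 10 + (c'.toNat - '0'.toNat) by simp [pvStep]]
      exact ih (fun x hx => hdt x (by simp [hx])) _

lemma dc_isDigit {k : Nat} (h : k < 10) : (Nat.digitChar k).isDigit = true := by
  interval_cases k <;> decide

lemma dc_toNat {k : Nat} (h : k < 10) : (Nat.digitChar k).toNat = 48 + k := by
  interval_cases k <;> decide

lemma dc_ne_zero {k : Nat} (h0 : 0 < k) (h : k < 10) : Nat.digitChar k ≠ '0' := by
  interval_cases k <;> decide

lemma char_of_toNat {c : Char} {k : Nat} (h : c.toNat = k) (d : Char) (hd : d.toNat = k) : c = d := by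
  subst h
  exact Char.ext (UInt32.toNat_inj.mp hd.symm)

lemma dc_of_digit {c : Char} (h : c.isDigit = true) : Nat.digitChar (c.toNat - 48) = c := by
  obtain ⟨h1, h2⟩ := isDigit_toNat h
  have hk : c.toNat - 48 < 10 := by omega
  refine (char_of_toNat (c := c) rfl _ ?_).symm
  rw [dc_toNat hk]
  omega

lemma toDigitsCore_rep : ∀ (fuel n : Nat) (ds : List Char), n < fuel →
    Nat.toDigitsCore 10 fuel n ds = pvRep n ++ ds := by
  intro fuel
  induction fuel with
  | zero => omega
  | succ fuel ih =>
    intro n ds h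
    rw [Nat.toDigitsCore]
    by_cases h10 : n / 10 = 0
    · have hn : n < 10 := by
        rcases (Nat.div_eq_zero_iff).mp h10 with h' | h'
        · omega
        · exact h'
      rw [if_pos h10, pvRep, dif_pos hn, Nat.mod_eq_of_lt hn]
      simp
    · have hn : ¬ n < 10 := fun hlt => h10 (Nat.div_eq_of_lt hlt)
      have hlt : n / 10 < n := Nat.div_lt_self (by omega) (by omega)
      rw [if_neg h10, ih _ _ (by omega)]
      conv_rhs => rw [pvRep, dif_neg hn]
      simp

lemma toChars_nonneg {x : Int} (h : 0 ≤ x) : PySem.Int.toChars x = pvRep x.toNat := by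
  unfold PySem.Int.toChars
  rw [if_neg (by omega)]
  unfold Nat.toDigits
  rw [toDigitsCore_rep _ _ _ (by omega)]
  simp

lemma rep_digits : ∀ n, ∀ c ∈ pvRep n, c.isDigit = true := by
  intro n
  induction n using Nat.strong_induction_on with
  | _ n ih =>
    intro c hc
    by_cases h : n < 10
    · rw [pvRep, dif_pos h] at hc
      simp at hc
      exact hc ▸ dc_isDigit h
    · rw [pvRep, dif_neg h] at hc
      rcases List.mem_append.mp hc with h1 | h1
      · exact ih (n / 10) (Nat.div_lt_self (by omega) (by omega)) c h1
      · simp at h1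
        exact h1 ▸ dc_isDigit (Nat.mod_lt _ (by omega))

lemma rep_head_ne_zero : ∀ n, n ≠ 0 → ∃ c t, pvRep n = c :: t ∧ c ≠ '0' := by
  intro n
  induction n using Nat.strong_induction_on with
  | _ n ih =>
    intro hn
    by_cases h : n < 10
    · exact ⟨_, _, by rw [pvRep, dif_pos h], dc_ne_zero (by omega) h⟩
    · obtain ⟨c, t, hct, hcz⟩ := ih (n / 10) (Nat.div_lt_self (by omega) (by omega))
        (by
          intro h0
          have : 1 ≤ n / 10 := (Nat.le_div_iff_mul_le (by omega)).mpr (by omega)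
          omega)
      exact ⟨c, t ++ [Nat.digitChar (n % 10)], by rw [pvRep, dif_neg h, hct]; simp, hcz⟩

lemma pvStep_le (k : Nat) (ds : List Char) : k ≤ ds.foldl pvStep k := by
  induction ds generalizing k with
  | nil => simp
  | cons c t ih =>
    simp only [List.foldl_cons]
    calc k ≤ pvStep k c := by unfold pvStep; omega
    _ ≤ _ := ih _

lemma rep_val : ∀ (ds : List Char), ds ≠ [] → (∀ c ∈ ds, c.isDigit = true) →
    (∀ c t, ds = c :: t → (t ≠ [] → c ≠ '0')) →
    pvRep (ds.foldl pvStep 0) = ds := by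
  intro ds
  induction ds using List.reverseRecOn with
  | nil => intro h; exact absurd rfl h
  | append_singleton init c ih =>
    intro _ hdig hhead
    by_cases hinit0 : init = []
    · -- singleton
      subst hinit0
      have hc : c.isDigit = true := hdig c (by simp)
      obtain ⟨h1, h2⟩ := isDigit_toNat hc
      simp only [List.nil_append, List.foldl_cons, List.foldl_nil]
      rw [show pvStep 0 c = c.toNat - 48 by unfold pvStep; rw [show '0'.toNat = 48 from rfl]; omega]
      rw [pvRep, dif_pos (by omega), dc_of_digit hc]
    · obtain ⟨c0, t0, hinit⟩ := List.exists_cons_of_ne_nil hinit0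
      have hc0 : c0 ≠ '0' := by
        refine hhead c0 (t0 ++ [c]) (by rw [hinit]; simp) (by simp)
      have hc0d : c0.isDigit = true := hdig c0 (by rw [hinit]; simp)
      have hdiginit : ∀ x ∈ init, x.isDigit = true := fun x hx => hdig x (by simp [hx])
      have hcd : c.isDigit = true := hdig c (by simp)
      obtain ⟨hc1, hc2⟩ := isDigit_toNat hcd
      obtain ⟨hb1, hb2⟩ := isDigit_toNat hc0d
      -- value of init is ≥ 1
      have hge : 1 ≤ init.foldl pvStep 0 := by
        rw [hinit, List.foldl_cons]
        have h48 : c0.toNat ≠ 48 := by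
          intro h48
          exact hc0 (char_of_toNat h48 '0' (by decide))
        calc 1 ≤ pvStep 0 c0 := by unfold pvStep; rw [show '0'.toNat = 48 from rfl]; omega
        _ ≤ _ := pvStep_le _ _
      have hd10 : c.toNat - '0'.toNat < 10 := by rw [show '0'.toNat = 48 from rfl]; omega
      rw [List.foldl_append, List.foldl_cons, List.foldl_nil]
      set v := init.foldl pvStep 0 with hv
      rw [show pvStep v c = v * 10 + (c.toNat - '0'.toNat) from rfl]
      rw [pvRep, dif_neg (by omega)]
      have hdiv : (v * 10 + (c.toNat - '0'.toNat)) / 10 = v := by omega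
      have hmod : (v * 10 + (c.toNat - '0'.toNat)) % 10 = c.toNat - '0'.toNat := by omega
      rw [hdiv, hmod]
      rw [hv, ih hinit0 hdiginit
        (by
          intro a b hab hbne
          rw [hinit] at hab
          exact (List.cons.injEq .. |>.mp hab).1 ▸ hc0)]
      congr 1
      rw [show c.toNat - '0'.toNat = c.toNat - 48 by rw [show '0'.toNat = 48 from rfl]]
      rw [dc_of_digit hcd]

-- single-character int()
lemma ofStr_single {c : Char} (h : c.isDigit = true) :
    PySem.Int.ofStr? (String.ofList [c]) = some ((c.toNat - '0'.toNat : Nat) : Int) := by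
  rw [PySem.Int.ofStr?_ofList]
  rw [ofChars_digits [c] (by simp) (by simpa using h)]
  simp [pvStep]

-- the Int-valued accumulation equals the Nat-valued one
lemma intFold (ds : List Char) (hd : ∀ c ∈ ds, c.isDigit = true) : ∀ (k : Nat),
    ds.foldl (fun (a : Int) c => a * 10 + (PySem.Int.ofStr? (String.ofList [c])).getD 0) (k : Int)
      = ((ds.foldl pvStep k : Nat) : Int) := by
  induction ds with
  | nil => simp
  | cons c t ih =>
    intro k
    have hc : c.isDigit = true := hd c (by simp)
    simp only [List.foldl_cons]
    rw [ofStr_single hc]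
    have : ((k : Int) * 10 + (some ((c.toNat - '0'.toNat : Nat) : Int)).getD 0) = ((pvStep k c : Nat) : Int) := by
      simp only [pvStep, Option.getD_some]
      push_cast
      ring
    rw [this]
    exact ih (fun x hx => hd x (by simp [hx])) _

lemma foldl_ite_char (l : List Char) (acc : List Char) :
    l.foldl (fun arr i => if i ≠ '0' then arr ++ [i] else arr) acc
      = acc ++ l.filter (fun i => !(i == '0')) := by
  -- (PySem.List.foldl_append_if expects a Bool-valued 'if p x = true' step; A's step is the
  -- Prop-ite 'if i ≠ '0'', so this small variant is proved directly)
  induction l generalizing acc with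
  | nil => simp
  | cons c t ih =>
    simp only [List.foldl_cons, List.filter_cons]
    by_cases hc : c = '0'
    · subst hc
      rw [if_neg (fun h => h rfl)]
      rw [show (!('0' == '0')) = false from rfl]
      simp only [Bool.false_eq_true, if_false]
      exact ih acc
    · rw [if_pos hc, show (!(c == '0')) = true by simp [hc]]
      rw [ih (acc ++ [c])]
      simp

-- ===== VERDICT (by name: the statement is the Claim_ definition above) =====
theorem sumAndMultiply_spec : Claim_equal_sumAndMultiply := by
  intro n hDom hPre
  unfold Spec_sumAndMultiply
  by_cases hn0 : n = 0
  · subst hn0; decide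
  have hpos : 0 < n := lt_of_le_of_ne hPre (Ne.symm hn0)
  unfold sumAndMultiply sumAndMultiply_alt
  rw [toChars_nonneg hPre]
  simp only [foldl_ite_char, List.nil_append]
  set m := n.toNat with hm
  obtain ⟨c0, t0, hrep, hc0⟩ := rep_head_ne_zero m (by omega)
  set F := List.filter (fun i => !(i == '0')) (pvRep m) with hF
  have hFcons : F = c0 :: List.filter (fun i => !(i == '0')) t0 := by
    rw [hF, hrep, List.filter_cons, show (!(c0 == '0')) = true by simp [hc0]]
    simp
  have hFne : F ≠ [] := by rw [hFcons]; simp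
  have hFdig : ∀ c ∈ F, c.isDigit = true := fun c hcF =>
    rep_digits m c (List.mem_of_mem_filter hcF)
  have hFnz : ∀ c ∈ F, c ≠ '0' := fun c hcF => by
    have := List.of_mem_filter hcF
    simpa using this
  rw [if_neg hFne]
  have hx : PySem.Int.ofStr? (String.ofList F) = some ((F.foldl pvStep 0 : Nat) : Int) := by
    rw [PySem.Int.ofStr?_ofList]
    exact ofChars_digits F hFne hFdig
  rw [hx]
  simp only [Option.getD_some]
  have hround : pvRep (F.foldl pvStep 0) = F :=
    rep_val F hFne hFdig (fun c t hct _ => hFnz c (by rw [hct]; exact List.mem_cons_self ..))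
  have htC : PySem.Int.toChars ((F.foldl pvStep 0 : Nat) : Int) = F := by
    rw [toChars_nonneg (by positivity)]
    rw [Int.toNat_natCast]
    exact hround
  rw [htC]
  have hstep : (fun (q : Int × Int) ch =>
        if ch ≠ '0' then
          (q.1 * 10 + (PySem.Int.ofStr? (String.ofList [ch])).getD 0,
            q.2 + (PySem.Int.ofStr? (String.ofList [ch])).getD 0)
        else q)
      = fun (q : Int × Int) ch => if (!(ch == '0')) = true then
          (fun (p : Int × Int) (c : Char) =>
            (p.1 * 10 + (PySem.Int.ofStr? (String.ofList [c])).getD 0,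
              p.2 + (PySem.Int.ofStr? (String.ofList [c])).getD 0)) q ch
        else q := by
    funext q ch
    by_cases hch : ch = '0' <;> simp [hch]
  rw [hstep, ← List.foldl_filter, ← hF,
    PySem.List.foldl_prod_mk
      (fun (a : Int) (c : Char) => a * 10 + (PySem.Int.ofStr? (String.ofList [c])).getD 0)
      (fun (a : Int) (c : Char) => a + (PySem.Int.ofStr? (String.ofList [c])).getD 0) F 0 0]
  have hfst := intFold F hFdig 0
  rw [Nat.cast_zero] at hfst
  rw [hfst]
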